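-- pv_equiv track=rewrite | github.com/Oumayma-O/chem-tutor-backend | app/utils/markdown_sanitizer.py | _skip_optional_square_brackets
-- ===== SOURCE A (Python) =====
-- def _skip_optional_square_brackets(s: str, i: int) -> int:
--     if i >= len(s) or s[i] != "[":
--         return i
--     depth = 1
--     k = i + 1
--     while k < len(s) and depth > 0:
--         if s[k] == "[":
--             depth += 1
--         elif s[k] == "]":
--             depth -= 1
--         k += 1
--     return k
-- ===== SOURCE B (Python) =====
-- def _skip_optional_square_brackets(s: str, i: int) -> int:
--     if not (0 <= i < len(s)) or s[i] != "[":
--         return i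
--     open_ = 1
--     pos = i + 1
--     while open_ > 0:
--         j = s.find("]", pos)
--         if j == -1:
--             return len(s)
--         open_ += s.count("[", pos, j) - 1
--         pos = j + 1
--     return pos
-- ===== Notes on version B (the rewrite author's own statement) =====
-- stated objective: alternative
-- what changed: B replaces A's per-character depth-counter scan with chunked jumps: it repeatedly str.find's the next ']' and adjusts the open-bracket balance with str.count of '[' over the skipped chunk, returning just past the ']' that closes the group.
-- intended difference: For -len(s) <= i < 0 with s[i] == '[', A's negative-index wraparound skips a bracket group found at the wrapped position and returns a non-negative index, while B returns i unchanged - the intended no-op, since no group starts at a negative position. — e.g. on _skip_optional_square_brackets("[]", -2): A returns 0, B returns -2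
import Mathlib
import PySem

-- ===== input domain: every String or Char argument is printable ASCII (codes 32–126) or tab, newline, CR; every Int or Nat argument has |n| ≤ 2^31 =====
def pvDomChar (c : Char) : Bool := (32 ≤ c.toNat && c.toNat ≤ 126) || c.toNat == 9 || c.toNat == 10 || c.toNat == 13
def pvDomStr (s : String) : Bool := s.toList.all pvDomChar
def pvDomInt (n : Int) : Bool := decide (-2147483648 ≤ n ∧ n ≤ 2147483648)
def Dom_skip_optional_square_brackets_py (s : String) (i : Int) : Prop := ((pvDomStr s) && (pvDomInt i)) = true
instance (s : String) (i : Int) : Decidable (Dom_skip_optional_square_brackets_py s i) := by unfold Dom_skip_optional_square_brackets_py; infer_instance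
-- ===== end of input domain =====

-- B replaces the per-character depth counter with chunked jumps between ']' occurrences via
-- str.find/str.count (objective: alternative decomposition; equivalence of return values proved
-- outside D_ below).

-- B replaces the per-character depth-counter scan with chunked jumps: repeatedly find the next ']'
-- and adjust the open-bracket balance by counting '[' over the skipped chunk (objective: alternative).
-- Fuel arguments (Nat) are pure totality guards carrying exact loop bounds; they never change a value.

-- ===== PORT A =====
-- A's while loop: k scans one char at a time, depth counts open brackets.
def aLoopGo (cs : List Char) (n : Int) : Nat → Int → Int → Int
  | 0, k, _depth => k
  | fuel + 1, k, depth =>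
    if k < n ∧ depth > 0 then
      aLoopGo cs n fuel (k + 1)
        (if (PySem.List.pyGet? cs k).getD ' ' = '[' then depth + 1
         else if (PySem.List.pyGet? cs k).getD ' ' = ']' then depth - 1 else depth)
    else k

def aLoop (cs : List Char) (n k depth : Int) : Int := aLoopGo cs n (n - k).toNat k depth

def skip_optional_square_brackets_py (s : String) (i : Int) : Int :=
  let cs := s.toList
  let n : Int := cs.length
  if i ≥ n then i
  else if (PySem.List.pyGet? cs i).getD ' ' ≠ '[' then i  -- pyGet? none = IndexError (excluded by Pre_)
  else aLoop cs n (i + 1) 1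

-- ===== PORT B =====
-- s.find("]", pos): first index j ≥ pos with s[j] = ']', else -1 (hand port of str.find with start; exact for pos ≥ 0)
def bFindGo (cs : List Char) (n : Int) : Nat → Int → Int
  | 0, _pos => -1
  | fuel + 1, pos =>
    if pos < n then
      if (PySem.List.pyGet? cs pos).getD ' ' = ']' then pos else bFindGo cs n fuel (pos + 1)
    else -1

def bFind (cs : List Char) (n pos : Int) : Int := bFindGo cs n (n - pos).toNat pos

-- s.count("[", pos, j): number of '[' in s[pos:j] (hand port of str.count with bounds; exact for 0 ≤ pos ≤ j ≤ len)
def bCountGo (cs : List Char) : Nat → Int → Int → Int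
  | 0, _pos, _j => 0
  | fuel + 1, pos, j =>
    if pos < j then
      (if (PySem.List.pyGet? cs pos).getD ' ' = '[' then 1 else 0) + bCountGo cs fuel (pos + 1) j
    else 0

def bCount (cs : List Char) (pos j : Int) : Int := bCountGo cs (j - pos).toNat pos j

-- B's while loop: jump to the next ']' and add the number of '[' in between
def bOuterGo (cs : List Char) (n : Int) : Nat → Int → Int → Int
  | 0, _openc, pos => pos
  | fuel + 1, openc, pos =>
    if openc > 0 then
      if bFind cs n pos = -1 then n
      else bOuterGo cs n fuel (openc + bCount cs pos (bFind cs n pos) - 1) (bFind cs n pos + 1)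
    else pos

def bOuter (cs : List Char) (n openc pos : Int) : Int := bOuterGo cs n ((n - pos).toNat + 1) openc pos

def skip_optional_square_brackets_py_alt (s : String) (i : Int) : Int :=
  let cs := s.toList
  let n : Int := cs.length
  if ¬ (0 ≤ i ∧ i < n) then i
  else if (PySem.List.pyGet? cs i).getD ' ' ≠ '[' then i
  else bOuter cs n 1 (i + 1)

-- ===== PRECONDITION & SPEC =====
-- Pre_ excludes exactly i < -len(s), where A raises IndexError on s[i].
def Pre_skip_optional_square_brackets_py (s : String) (i : Int) : Prop :=
  -(s.toList.length : Int) ≤ i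
instance (s : String) (i : Int) : Decidable (Pre_skip_optional_square_brackets_py s i) := by unfold Pre_skip_optional_square_brackets_py; infer_instance

def pvWitness_skip_optional_square_brackets_py : String × Int := ("[a[b]]c", 0)

-- For -len(s) ≤ i < 0 with s[i] == '[', A's negative-index wraparound skips a group found at the
-- wrapped position and returns a non-negative index, while B returns i unchanged — the intended
-- no-op, since no bracket group starts at a negative position.
def D_skip_optional_square_brackets_py (s : String) (i : Int) : Prop :=
  i < 0 ∧ PySem.List.pyGet? s.toList i = some '['
instance (s : String) (i : Int) : Decidable (D_skip_optional_square_brackets_py s i) := by unfold D_skip_optional_square_brackets_py; infer_instance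

def Spec_skip_optional_square_brackets_py (s : String) (i : Int) (out : Int) : Prop := ¬ D_skip_optional_square_brackets_py s i → out = skip_optional_square_brackets_py_alt s i
instance (s : String) (i : Int) (out : Int) : Decidable (Spec_skip_optional_square_brackets_py s i out) := by unfold Spec_skip_optional_square_brackets_py; infer_instance

def pvDiffWitness_skip_optional_square_brackets_py : String × Int := ("[]", -2)
def pvDiffWitnessOut_skip_optional_square_brackets_py : Int × Int := (0, -2)

-- ===== CLAIM (what is proved, stated in full; the proofs are below) =====
def Claim_unchanged_skip_optional_square_brackets_py : Prop := ∀ (s : String) (i : Int), Dom_skip_optional_square_brackets_py s i → Pre_skip_optional_square_brackets_py s i → Spec_skip_optional_square_brackets_py s i (skip_optional_square_brackets_py s i)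
def Claim_changed_skip_optional_square_brackets_py : Prop := Dom_skip_optional_square_brackets_py (pvDiffWitness_skip_optional_square_brackets_py.1) (pvDiffWitness_skip_optional_square_brackets_py.2) ∧ Pre_skip_optional_square_brackets_py (pvDiffWitness_skip_optional_square_brackets_py.1) (pvDiffWitness_skip_optional_square_brackets_py.2) ∧ D_skip_optional_square_brackets_py (pvDiffWitness_skip_optional_square_brackets_py.1) (pvDiffWitness_skip_optional_square_brackets_py.2) ∧ skip_optional_square_brackets_py (pvDiffWitness_skip_optional_square_brackets_py.1) (pvDiffWitness_skip_optional_square_brackets_py.2) = pvDiffWitnessOut_skip_optional_square_brackets_py.1 ∧ skip_optional_square_brackets_py_alt (pvDiffWitness_skip_optional_square_brackets_py.1) (pvDiffWitness_skip_optional_square_brackets_py.2) = pvDiffWitnessOut_skip_optional_square_brackets_py.2 ∧ pvDiffWitnessOut_skip_optional_square_brackets_py.1 ≠ pvDiffWitnessOut_skip_optional_square_brackets_py.2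
def Claim_exact_skip_optional_square_brackets_py : Prop := ∀ (s : String) (i : Int), Dom_skip_optional_square_brackets_py s i → Pre_skip_optional_square_brackets_py s i → D_skip_optional_square_brackets_py s i → skip_optional_square_brackets_py s i ≠ skip_optional_square_brackets_py_alt s i

-- ===== LEMMAS AND PROOFS =====
-- one-step unfolding laws (the exact fuel at each call site makes them definitional case splits)
theorem aLoop_unfold (cs : List Char) (n k depth : Int) :
    aLoop cs n k depth
      = if k < n ∧ depth > 0 then
          aLoop cs n (k + 1)
            (if (PySem.List.pyGet? cs k).getD ' ' = '[' then depth + 1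
             else if (PySem.List.pyGet? cs k).getD ' ' = ']' then depth - 1 else depth)
        else k := by
  unfold aLoop
  by_cases hk : k < n
  · have h1 : (n - k).toNat = (n - (k + 1)).toNat + 1 := by omega
    rw [h1]
    simp [aLoopGo]
  · have h0 : (n - k).toNat = 0 := by omega
    rw [h0]
    simp only [aLoopGo]
    rw [if_neg (by omega)]

theorem bFind_unfold (cs : List Char) (n pos : Int) :
    bFind cs n pos
      = if pos < n then
          if (PySem.List.pyGet? cs pos).getD ' ' = ']' then pos else bFind cs n (pos + 1)
        else -1 := by
  unfold bFind
  by_cases hp : pos < n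
  · have h1 : (n - pos).toNat = (n - (pos + 1)).toNat + 1 := by omega
    rw [h1]
    simp [bFindGo, hp]
  · have h0 : (n - pos).toNat = 0 := by omega
    rw [h0]
    simp [bFindGo, hp]

theorem bCount_unfold (cs : List Char) (pos j : Int) :
    bCount cs pos j
      = if pos < j then
          (if (PySem.List.pyGet? cs pos).getD ' ' = '[' then 1 else 0) + bCount cs (pos + 1) j
        else 0 := by
  unfold bCount
  by_cases hp : pos < j
  · have h1 : (j - pos).toNat = (j - (pos + 1)).toNat + 1 := by omega
    rw [h1]
    simp [bCountGo, hp]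
  · have h0 : (j - pos).toNat = 0 := by omega
    rw [h0]
    simp [bCountGo, hp]

theorem bFind_ge_n (cs : List Char) (n pos : Int) (h : n ≤ pos) : bFind cs n pos = -1 := by
  rw [bFind_unfold]; simp; omega

theorem bFind_self (cs : List Char) (n pos : Int) (h : pos < n)
    (hc : (PySem.List.pyGet? cs pos).getD ' ' = ']') : bFind cs n pos = pos := by
  rw [bFind_unfold]; simp [h, hc]

theorem bFind_step (cs : List Char) (n pos : Int) (h : pos < n)
    (hc : (PySem.List.pyGet? cs pos).getD ' ' ≠ ']') : bFind cs n pos = bFind cs n (pos + 1) := by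
  rw [bFind_unfold]; simp [h, hc]

theorem bCount_nil (cs : List Char) (pos j : Int) (h : j ≤ pos) : bCount cs pos j = 0 := by
  rw [bCount_unfold]; simp; omega

theorem bCount_step (cs : List Char) (pos j : Int) (h : pos < j) :
    bCount cs pos j = (if (PySem.List.pyGet? cs pos).getD ' ' = '[' then 1 else 0) + bCount cs (pos + 1) j := by
  rw [bCount_unfold]; simp [h]

theorem bFindGo_range (cs : List Char) (n : Int) (fuel : Nat) : ∀ (pos : Int),
    bFindGo cs n fuel pos ≠ -1 → pos ≤ bFindGo cs n fuel pos ∧ bFindGo cs n fuel pos < n := by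
  induction fuel with
  | zero => intro pos h; simp [bFindGo] at h
  | succ fuel ih =>
    intro pos h
    simp only [bFindGo] at h ⊢
    by_cases hp : pos < n
    · simp only [hp, if_pos] at h ⊢
      by_cases hc : (PySem.List.pyGet? cs pos).getD ' ' = ']'
      · simp only [hc, if_pos] at h ⊢; omega
      · simp only [hc, if_neg, not_false_iff] at h ⊢
        have := ih (pos + 1) h
        omega
    · simp [hp] at h

theorem bFind_range (cs : List Char) (n : Int) (pos : Int)
    (h : bFind cs n pos ≠ -1) : pos ≤ bFind cs n pos ∧ bFind cs n pos < n :=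
  bFindGo_range cs n _ pos h

theorem bOuterGo_fuel (cs : List Char) (n : Int) (f1 : Nat) : ∀ (f2 : Nat) (openc pos : Int),
    (n - pos).toNat < f1 → (n - pos).toNat < f2 →
    bOuterGo cs n f1 openc pos = bOuterGo cs n f2 openc pos := by
  induction f1 with
  | zero => intro f2 openc pos h1 _; omega
  | succ f1 ih =>
    intro f2 openc pos h1 h2
    obtain ⟨g2, rfl⟩ : ∃ g2, f2 = g2 + 1 := ⟨f2 - 1, by omega⟩
    simp only [bOuterGo]
    by_cases ho : openc > 0
    · simp only [ho, if_pos]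
      by_cases hj : bFind cs n pos = -1
      · simp [hj]
      · have hr := bFind_range cs n pos hj
        simp only [hj, if_neg, not_false_iff]
        exact ih g2 _ (bFind cs n pos + 1) (by omega) (by omega)
    · simp [ho]

theorem bOuter_unfold (cs : List Char) (n openc pos : Int) :
    bOuter cs n openc pos
      = if openc > 0 then
          if bFind cs n pos = -1 then n
          else bOuter cs n (openc + bCount cs pos (bFind cs n pos) - 1) (bFind cs n pos + 1)
        else pos := by
  conv_lhs => unfold bOuter
  simp only [bOuterGo]
  by_cases ho : openc > 0
  · simp only [ho, if_pos]
    by_cases hj : bFind cs n pos = -1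
    · simp [hj]
    · have hr := bFind_range cs n pos hj
      simp only [hj, if_neg, not_false_iff]
      unfold bOuter
      exact bOuterGo_fuel cs n ((n - pos).toNat) ((n - (bFind cs n pos + 1)).toNat + 1)
        (openc + bCount cs pos (bFind cs n pos) - 1) (bFind cs n pos + 1) (by omega) (by omega)
  · simp [ho]

-- B's loop absorbs a non-']' character: the next ']' and the '[' count shift together.
theorem bOuter_shift (cs : List Char) (n d pos : Int) (hd : 0 < d) (hp : pos < n)
    (hc : (PySem.List.pyGet? cs pos).getD ' ' ≠ ']') :
    bOuter cs n d pos
      = bOuter cs n (if (PySem.List.pyGet? cs pos).getD ' ' = '[' then d + 1 else d) (pos + 1) := by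
  have hfind := bFind_step cs n pos hp hc
  have hd' : (0:Int) < if (PySem.List.pyGet? cs pos).getD ' ' = '[' then d + 1 else d := by
    split <;> omega
  rw [bOuter_unfold cs n d pos,
      bOuter_unfold cs n (if (PySem.List.pyGet? cs pos).getD ' ' = '[' then d + 1 else d) (pos + 1)]
  simp only [hd, hd', if_pos]
  by_cases hj : bFind cs n (pos + 1) = -1
  · simp [hfind, hj]
  · have hr := bFind_range cs n (pos + 1) hj
    have hcnt := bCount_step cs pos (bFind cs n (pos + 1)) (by omega)
    simp only [hfind, hj, if_neg, not_false_iff]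
    rw [hcnt]
    congr 1
    split <;> omega

-- main equivalence of the two loops
theorem loop_eq (cs : List Char) (n pos d : Int) (hn : n = cs.length)
    (h0 : 0 ≤ pos) (hpn : pos ≤ n) (hd : 1 ≤ d) :
    aLoop cs n pos d = bOuter cs n d pos := by
  by_cases hp : pos < n
  · obtain ⟨c, hc⟩ : ∃ c, PySem.List.pyGet? cs pos = some c :=
      ⟨_, PySem.List.pyGet?_eq_some_getElem (xs := cs) h0 (by omega)⟩
    by_cases hcb : c = ']'
    · -- closing bracket: depth decreases
      subst hcb
      rw [aLoop_unfold]
      rw [if_pos ⟨hp, by omega⟩]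
      simp only [hc, Option.getD_some, if_neg (by decide : ¬ (']':Char) = '[')]
      have hfind : bFind cs n pos = pos := bFind_self cs n pos hp (by simp [hc])
      rw [bOuter_unfold, if_pos (by omega : d > 0), hfind,
        if_neg (by omega : ¬ pos = -1),
        bCount_nil cs pos pos (by omega)]
      by_cases hd1 : d = 1
      · subst hd1
        rw [aLoop_unfold, bOuter_unfold]
        norm_num
      · have h1 : 1 ≤ d - 1 := by omega
        have := loop_eq cs n (pos + 1) (d - 1) hn (by omega) (by omega) h1
        simpa using this
    · -- non-']' character
      rw [aLoop_unfold, if_pos ⟨hp, by omega⟩]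
      simp only [hc, Option.getD_some]
      rw [bOuter_shift cs n d pos (by omega) hp (by simp [hc, hcb])]
      have hd' : 1 ≤ (if (PySem.List.pyGet? cs pos).getD ' ' = '[' then d + 1 else d) := by
        split <;> omega
      rw [← loop_eq cs n (pos + 1) (if (PySem.List.pyGet? cs pos).getD ' ' = '[' then d + 1 else d)
        hn (by omega) (by omega) hd']
      simp [hc, hcb]
  · -- pos = n
    have hpe : pos = n := by omega
    rw [aLoop_unfold, if_neg (by omega : ¬ (pos < n ∧ d > 0)),
      bOuter_unfold, if_pos (by omega : d > 0),
      bFind_ge_n cs n pos (by omega)]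
    simp [hpe]
termination_by (n - pos).toNat
decreasing_by all_goals omega

theorem aLoopGo_ge (cs : List Char) (n : Int) (fuel : Nat) : ∀ (k d : Int),
    k ≤ aLoopGo cs n fuel k d := by
  induction fuel with
  | zero => intro k d; simp [aLoopGo]
  | succ fuel ih =>
    intro k d
    simp only [aLoopGo]
    split
    · have := ih (k + 1)
        (if (PySem.List.pyGet? cs k).getD ' ' = '[' then d + 1
         else if (PySem.List.pyGet? cs k).getD ' ' = ']' then d - 1 else d)
      omega
    · omega

theorem aLoop_ge (cs : List Char) (n k d : Int) : k ≤ aLoop cs n k d :=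
  aLoopGo_ge cs n _ k d

-- ===== VERDICT (by name: the statement is the Claim_ definition above) =====
theorem skip_optional_square_brackets_py_spec : Claim_unchanged_skip_optional_square_brackets_py := by
  intro s i _ hpre hnd
  unfold Pre_skip_optional_square_brackets_py at hpre
  unfold D_skip_optional_square_brackets_py at hnd
  unfold skip_optional_square_brackets_py skip_optional_square_brackets_py_alt
  set cs := s.toList with hcs
  set n : Int := (cs.length : Int) with hn
  by_cases hge : i ≥ n
  · rw [if_pos hge, if_pos (by omega : ¬ (0 ≤ i ∧ i < n))]
  · rw [if_neg hge]
    by_cases hneg : i < 0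
    · -- negative index, not in D_: s[i] ≠ '[' so both return i
      have hne : (PySem.List.pyGet? cs i).getD ' ' ≠ '[' := by
        intro hcontr
        apply hnd
        refine ⟨hneg, ?_⟩
        obtain ⟨c, hc⟩ : ∃ c, PySem.List.pyGet? cs i = some c := by
          rcases h : PySem.List.pyGet? cs i with _ | c
          · rw [PySem.List.pyGet?_eq_none_iff] at h
            exact absurd (by simp [PySem.Raise.InRange]; omega) h
          · exact ⟨c, rfl⟩
        rw [hc] at hcontr ⊢
        simpa using hcontr
      rw [if_pos hne, if_pos (by omega : ¬ (0 ≤ i ∧ i < n))]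
    · -- 0 ≤ i < n
      rw [if_neg (by omega : ¬ ¬ (0 ≤ i ∧ i < n))]
      by_cases hbr : (PySem.List.pyGet? cs i).getD ' ' = '['
      · rw [if_neg (by simpa using hbr), if_neg (by simpa using hbr)]
        exact loop_eq cs n (i + 1) 1 rfl (by omega) (by omega) (by omega)
      · rw [if_pos hbr, if_pos hbr]

theorem skip_optional_square_brackets_py_changed : Claim_changed_skip_optional_square_brackets_py := by
  unfold Claim_changed_skip_optional_square_brackets_py; decide

theorem skip_optional_square_brackets_py_tight : Claim_exact_skip_optional_square_brackets_py := by
  intro s i _ hpre hd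
  obtain ⟨hneg, hbr⟩ := hd
  unfold Pre_skip_optional_square_brackets_py at hpre
  have hge := aLoop_ge s.toList (s.toList.length : Int) (i + 1) 1
  unfold skip_optional_square_brackets_py skip_optional_square_brackets_py_alt
  rw [if_neg (show ¬ i ≥ ((s.toList.length : Nat) : Int) by omega),
      if_neg (show ¬ (PySem.List.pyGet? s.toList i).getD ' ' ≠ '[' by simp [hbr]),
      if_pos (show ¬ (0 ≤ i ∧ i < ((s.toList.length : Nat) : Int)) by omega)]
  omega
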